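-- pv_equiv track=rewrite | github.com/Jooh34/algorithm | kakao2017/secret_map.py | solution
-- ===== SOURCE A (Python) =====
-- def solution(n, arr1, arr2):
--     answer = []
--
--     for i in range(n):
--         n1 = arr1[i]
--         n2 = arr2[i]
--         result = ''
--
--         bit_or = n1 | n2
--         for j in range(n):
--             if bit_or % 2:
--                 result = '#' + result
--             else:
--                 result = ' ' + result
--             bit_or = bit_or >> 1
--
--         answer.append(result)
--     return answer
-- ===== SOURCE B (Python) =====
-- def solution(n, arr1, arr2):
--     if n <= 0:
--         return []
--     table = str.maketrans('10', '# ')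
--     return [format((arr1[i] | arr2[i]) % (1 << n), 'b').zfill(n).translate(table)
--             for i in range(n)]
-- ===== Notes on version B (the rewrite author's own statement) =====
-- stated objective: idiomatic
-- what changed: A's inner per-bit loop that shifts bit_or and prepends '#'/' ' characters is replaced by converting arr1[i]|arr2[i] (masked to the low n bits via % (1<<n)) to a binary string with format(...,'b'), zero-padding with zfill(n), and mapping digits to characters with str.translate.
import Mathlib
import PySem

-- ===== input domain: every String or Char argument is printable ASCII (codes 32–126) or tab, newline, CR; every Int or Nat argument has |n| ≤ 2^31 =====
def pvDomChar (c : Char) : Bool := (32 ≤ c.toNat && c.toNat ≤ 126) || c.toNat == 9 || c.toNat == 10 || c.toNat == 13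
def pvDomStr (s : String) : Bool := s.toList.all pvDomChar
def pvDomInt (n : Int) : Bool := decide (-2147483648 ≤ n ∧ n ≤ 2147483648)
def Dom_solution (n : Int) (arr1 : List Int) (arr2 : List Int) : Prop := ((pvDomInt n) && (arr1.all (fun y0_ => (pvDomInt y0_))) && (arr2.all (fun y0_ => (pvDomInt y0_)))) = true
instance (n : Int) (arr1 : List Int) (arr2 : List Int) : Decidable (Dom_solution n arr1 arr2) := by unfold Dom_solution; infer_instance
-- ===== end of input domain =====

-- B replaces A's per-bit shift/prepend inner loop by a binary-string conversion
-- (format(v,'b') → zfill → translate); objective: idiomatic, same asymptotic cost.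

-- ===== PORT A =====
-- inner loop state: (result as List Char, bit_or); '#' + result prepends a char
def solution (n : Int) (arr1 : List Int) (arr2 : List Int) : List String :=
  (PySem.List.pyRange 0 n 1).foldl (fun answer i =>
    let n1 := PySem.List.pyGetD arr1 i 0   -- arr1[i]; Pre_ keeps i in range (IndexError otherwise)
    let n2 := PySem.List.pyGetD arr2 i 0
    let st := (PySem.List.pyRange 0 n 1).foldl (fun (st : List Char × Int) _j =>
        (if PySem.Int.mod st.2 2 ≠ 0 then '#' :: st.1 else ' ' :: st.1, st.2 >>> (1:Nat)))
      (([] : List Char), PySem.Int.bor n1 n2)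
    answer ++ [String.ofList st.1]) []

-- ===== PORT B =====
-- format(w,'b') for w ≥ 0: binary digits, '0' for zero   (exact: hand-written recursion)
def binChars (w : Nat) : List Char :=
  if w = 0 then [] else binChars (w / 2) ++ [if w % 2 = 1 then '1' else '0']
def fmtBin (w : Nat) : List Char := if w = 0 then ['0'] else binChars w
-- str.zfill(k): pad with '0' on the left to length k
def zfillChars (k : Nat) (cs : List Char) : List Char := List.replicate (k - cs.length) '0' ++ cs
-- str.translate(str.maketrans('10', '# '))
def trChar (c : Char) : Char := if c = '1' then '#' else if c = '0' then ' ' else c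

def solution_alt (n : Int) (arr1 : List Int) (arr2 : List Int) : List String :=
  if n ≤ 0 then []
  else
    (PySem.List.pyRange 0 n 1).map (fun i =>
      let v := PySem.Int.bor (PySem.List.pyGetD arr1 i 0) (PySem.List.pyGetD arr2 i 0)
      let w := (PySem.Int.mod v ((1:Int) <<< n.toNat)).toNat   -- v % (1 << n) ≥ 0
      String.ofList ((zfillChars n.toNat (fmtBin w)).map trChar))

-- ===== PRECONDITION & SPEC =====
-- Pre_: arr1[i]/arr2[i] raise IndexError in A when either list is shorter than n.
def Pre_solution (n : Int) (arr1 : List Int) (arr2 : List Int) : Prop :=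
  n ≤ (arr1.length : Int) ∧ n ≤ (arr2.length : Int)
instance (n : Int) (arr1 : List Int) (arr2 : List Int) : Decidable (Pre_solution n arr1 arr2) := by unfold Pre_solution; infer_instance
def pvWitness_solution : Int × List Int × List Int := (2, [1, 3], [2, 0])
def Spec_solution (n : Int) (arr1 : List Int) (arr2 : List Int) (out : List String) : Prop := out = solution_alt n arr1 arr2
instance (n : Int) (arr1 : List Int) (arr2 : List Int) (out : List String) : Decidable (Spec_solution n arr1 arr2 out) := by unfold Spec_solution; infer_instance

-- ===== CLAIM (what is proved, stated in full; the proofs are below) =====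
def Claim_equal_solution : Prop := ∀ (n : Int) (arr1 : List Int) (arr2 : List Int), Dom_solution n arr1 arr2 → Pre_solution n arr1 arr2 → Spec_solution n arr1 arr2 (solution n arr1 arr2)

-- ===== LEMMAS AND PROOFS =====

lemma binChars_zero : binChars 0 = [] := by rw [binChars]; rfl
lemma fmtBin_zero : fmtBin 0 = ['0'] := rfl
lemma fmtBin_one : fmtBin 1 = ['1'] := by
  rw [fmtBin]; norm_num; rw [binChars]; norm_num [binChars_zero]

-- A's inner-loop chars, high bit first (structural description of A's prepend loop)
def aChars (v : Int) : Nat → List Char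
  | 0 => []
  | k+1 => aChars (v >>> (1:Nat)) k ++ [if PySem.Int.mod v 2 ≠ 0 then '#' else ' ']

-- '0'/'1' digits, high first
def pbChars (v : Int) : Nat → List Char
  | 0 => []
  | k+1 => pbChars (v >>> (1:Nat)) k ++ [if PySem.Int.mod v 2 = 1 then '1' else '0']

lemma inner_foldl_eq_aChars (l : List Int) (v : Int) (res : List Char) :
    (l.foldl (fun (st : List Char × Int) _j =>
        (if PySem.Int.mod st.2 2 ≠ 0 then '#' :: st.1 else ' ' :: st.1, st.2 >>> (1:Nat)))
      (res, v)).1 = aChars v l.length ++ res := by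
  induction l generalizing v res with
  | nil => simp [aChars]
  | cons x t ih =>
      simp only [List.foldl_cons, List.length_cons, aChars, ih]
      split_ifs <;> simp

lemma aChars_eq_map_tr (v : Int) (k : Nat) : aChars v k = (pbChars v k).map trChar := by
  induction k generalizing v with
  | zero => rfl
  | succ k ih =>
      simp only [aChars, pbChars, List.map_append, ih]
      have h2 : (0:Int) < 2 := by norm_num
      have hm := PySem.Int.mod_nonneg v h2
      have hl := PySem.Int.mod_lt v h2
      interval_cases h : (PySem.Int.mod v 2) <;> simp [trChar]

lemma shiftRight_one_int (v : Int) : v >>> (1:Nat) = v / 2 := by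
  rw [Int.shiftRight_eq_div_pow]; norm_num

lemma emod_two_pow_succ (v : Int) (k : Nat) :
    v % 2 ^ (k+1) = 2 * (v >>> (1:Nat) % 2 ^ k) + v % 2 := by
  rw [shiftRight_one_int]
  have hM : (0:Int) < 2 ^ k := by positivity
  have hv : v = 2 * (v / 2) + v % 2 := by omega
  have h1 : (2 * (v / 2)) % (2 * 2 ^ k) = 2 * ((v / 2) % 2 ^ k) :=
    Int.mul_emod_mul_of_pos _ _ (by norm_num)
  have hr0 : 0 ≤ v % 2 := by omega
  have hr1 : v % 2 < 2 := by omega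
  have hq0 : 0 ≤ (v / 2) % 2 ^ k := Int.emod_nonneg _ (by positivity)
  have hq1 : (v / 2) % 2 ^ k < 2 ^ k := Int.emod_lt_of_pos _ hM
  calc v % 2 ^ (k+1) = (2 * (v / 2) + v % 2) % (2 * 2 ^ k) := by
        rw [← hv]; ring_nf
      _ = ((2 * (v / 2)) % (2 * 2 ^ k) + (v % 2) % (2 * 2 ^ k)) % (2 * 2 ^ k) :=
        Int.add_emod _ _ _
      _ = (2 * ((v / 2) % 2 ^ k) + v % 2) % (2 * 2 ^ k) := by
        rw [h1, Int.emod_eq_of_lt hr0 (by omega)]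
      _ = 2 * ((v / 2) % 2 ^ k) + v % 2 := Int.emod_eq_of_lt (by omega) (by omega)

lemma zfill_fmtBin_step (k w r : Nat) (hk : 1 ≤ k) (hr : r < 2) :
    zfillChars (k+1) (fmtBin (2 * w + r)) =
      zfillChars k (fmtBin w) ++ [if r = 1 then '1' else '0'] := by
  by_cases hw : w = 0
  · subst hw
    have hfr : fmtBin r = [if r = 1 then '1' else '0'] := by
      interval_cases r <;> simp [fmtBin_zero, fmtBin_one]
    have hf0 : fmtBin 0 = ['0'] := fmtBin_zero
    simp only [Nat.mul_zero, Nat.zero_add, hfr, hf0, zfillChars, List.length_singleton]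
    obtain ⟨k', rfl⟩ : ∃ k', k = k' + 1 := ⟨k - 1, by omega⟩
    have h1 : k' + 1 + 1 - 1 = k' + 1 := by omega
    have h2 : k' + 1 - 1 = k' := by omega
    rw [h1, h2, List.replicate_succ']
  · have hnz : 2 * w + r ≠ 0 := by omega
    have hdiv : (2 * w + r) / 2 = w := by omega
    have hmod : (2 * w + r) % 2 = r := by omega
    have hbc : binChars (2 * w + r) = binChars w ++ [if r = 1 then '1' else '0'] := by
      rw [binChars]
      simp only [if_neg hnz, hdiv, hmod]
    simp only [fmtBin, if_neg hnz, if_neg hw, hbc, zfillChars, List.length_append,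
      List.length_singleton]
    have : k + 1 - (binChars w).length - 1 = k - (binChars w).length := by omega
    simp [Nat.add_sub_add_right, List.append_assoc]

lemma pbChars_eq_zfill (k : Nat) (hk : 1 ≤ k) (v : Int) :
    zfillChars k (fmtBin ((v % 2 ^ k).toNat)) = pbChars v k := by
  induction k generalizing v with
  | zero => omega
  | succ k ih =>
      have hmod2 : 0 ≤ v % 2 ∧ v % 2 < 2 := by omega
      have hM : (0:Int) < 2 ^ k := by positivity
      have hq0 : 0 ≤ (v >>> (1:Nat)) % 2 ^ k := by
        rw [shiftRight_one_int]; exact Int.emod_nonneg _ (by positivity)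
      have hsplit : ((v % 2 ^ (k+1)).toNat)
          = 2 * ((v >>> (1:Nat) % 2 ^ k).toNat) + (v % 2).toNat := by
        rw [emod_two_pow_succ v k]; omega
      by_cases hk1 : k = 0
      · subst hk1
        simp only [pbChars, List.nil_append]
        have h1 : v % 2 ^ 1 = v % 2 := by norm_num
        rw [h1]
        have : fmtBin ((v % 2).toNat) = [if (v % 2).toNat = 1 then '1' else '0'] := by
          rcases (by omega : (v % 2).toNat = 0 ∨ (v % 2).toNat = 1) with h | h <;>
            rw [h] <;> simp [fmtBin_zero, fmtBin_one]
        rw [this]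
        have hpm : PySem.Int.mod v 2 = v % 2 := PySem.Int.mod_eq_emod_of_pos (by norm_num)
        simp only [zfillChars, List.length_singleton, Nat.sub_self, List.replicate_zero,
          List.nil_append, hpm]
        congr 1
        rcases (by omega : v % 2 = 0 ∨ v % 2 = 1) with h | h <;> simp [h]
      · have hk' : 1 ≤ k := by omega
        rw [hsplit, zfill_fmtBin_step k _ _ hk' (by omega), ih hk' (v >>> (1:Nat))]
        simp only [pbChars]
        congr 1
        have hpm : PySem.Int.mod v 2 = v % 2 := PySem.Int.mod_eq_emod_of_pos (by norm_num)
        rw [hpm]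
        rcases (by omega : v % 2 = 0 ∨ v % 2 = 1) with h | h <;> simp [h]

lemma pyRange_length (m : Nat) : (PySem.List.pyRange 0 (m:Int) 1).length = m := by
  rw [PySem.List.pyRange_zero_natCast m]; simp

-- per-row equality: A's inner loop result = B's translated padded binary string
lemma row_eq (n : Int) (hn : ¬ n ≤ 0) (v : Int) :
    aChars v n.toNat = (zfillChars n.toNat (fmtBin ((PySem.Int.mod v ((1:Int) <<< n.toNat)).toNat))).map trChar := by
  have hsl : ((1:Int) <<< n.toNat) = 2 ^ n.toNat := by simp [Int.shiftLeft_eq]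
  have hpos : (0:Int) < 2 ^ n.toNat := by positivity
  rw [hsl, PySem.Int.mod_eq_emod_of_pos hpos,
      pbChars_eq_zfill n.toNat (by omega) v, aChars_eq_map_tr]

-- ===== VERDICT (by name: the statement is the Claim_ definition above) =====
theorem solution_spec : Claim_equal_solution := by
  intro n arr1 arr2 _hdom _hpre
  unfold Spec_solution solution solution_alt
  by_cases hn : n ≤ 0
  · rw [PySem.List.pyRange_one_eq_nil hn]
    simp [hn]
  · rw [if_neg hn]
    rw [PySem.List.foldl_append_singleton_eq_map]
    simp only [List.nil_append]
    refine List.map_congr_left ?_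
    intro i _
    have h1 := inner_foldl_eq_aChars (PySem.List.pyRange 0 n 1)
      (PySem.Int.bor (PySem.List.pyGetD arr1 i 0) (PySem.List.pyGetD arr2 i 0)) []
    have hlen : (PySem.List.pyRange 0 n 1).length = n.toNat := by
      have : n = ((n.toNat : Nat) : Int) := by omega
      rw [this]; exact pyRange_length n.toNat
    simp only [List.append_nil] at h1
    simp only [h1, hlen, row_eq n hn]
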